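-- pv_equiv track=rewrite | github.com/Chinyass/cet_tvsi | back/LTP.py | convert_hex_serial_to_dec
-- ===== SOURCE A (Python) =====
-- def convert_hex_serial_to_dec(hex_serial):
--     st= ''
--     r = []
--     serial = hex_serial.replace('ELTX','454C5458')
--     for i,num in enumerate(serial):
--          st +=num
--          if i%2 != 0:
--              r.append(st)
--              st = ''
--
--     return '.'.join( list(map(lambda x: str(int(x,16)),r)) )
-- ===== SOURCE B (Python) =====
-- def convert_hex_serial_to_dec(hex_serial):
--     serial = hex_serial.replace('ELTX', '454C5458')
--     parts = []
--     while len(serial) >= 2: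
--         parts.append(str(int(serial[:2], 16)))
--         serial = serial[2:]
--     return '.'.join(parts)
-- ===== Notes on version B (the rewrite author's own statement) =====
-- stated objective: simpler
-- what changed: Replaces the enumerate loop with its char accumulator and index-parity branch by a while loop that slices the leading two characters off the string each iteration, so the st buffer and the i%2 test disappear.
-- outside the precondition, e.g. on convert_hex_serial_to_dec('zz'): A raises ValueError, B raises ValueError
import Mathlib
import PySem

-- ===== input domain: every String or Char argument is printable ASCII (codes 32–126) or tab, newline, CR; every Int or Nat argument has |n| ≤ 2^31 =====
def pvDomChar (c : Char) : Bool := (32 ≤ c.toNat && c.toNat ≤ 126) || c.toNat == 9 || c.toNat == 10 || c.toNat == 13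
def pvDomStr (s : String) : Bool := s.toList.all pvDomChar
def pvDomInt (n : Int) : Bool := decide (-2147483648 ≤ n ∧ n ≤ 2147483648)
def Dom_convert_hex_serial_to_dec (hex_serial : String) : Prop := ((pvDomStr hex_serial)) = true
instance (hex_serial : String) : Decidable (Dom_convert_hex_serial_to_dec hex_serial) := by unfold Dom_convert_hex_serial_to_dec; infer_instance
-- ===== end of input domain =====

-- B replaces A's char-by-char accumulator with an index/parity branch by a while loop
-- that peels two characters at a time with slices (objective: simpler); same return value.

-- ===== PORT A =====
-- one step of A's `for i,num in enumerate(serial)` loop; state = (st, r) as lists of chars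
def pvStepA (acc : List Char × List (List Char)) (p : Int × Char) :
    List Char × List (List Char) :=
  let st := acc.1 ++ [p.2]
  if PySem.Int.mod p.1 2 ≠ 0 then ([], acc.2 ++ [st]) else (st, acc.2)

-- int(x,16) raises ValueError on a non-parsing pair: Pre_ excludes that, `.getD 0` is never hit there
def convert_hex_serial_to_dec (hex_serial : String) : String :=
  PySem.Str.join "."
    ((((PySem.List.enumerate (PySem.Str.replace hex_serial "ELTX" "454C5458").toList 0).foldl
        pvStepA ([], [])).2).map
      (fun x => PySem.Int.toStr ((PySem.Int.ofCharsBase? x 16).getD 0)))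

-- ===== PORT B =====
-- Source B's `while len(serial) >= 2: parts.append(str(int(serial[:2],16))); serial = serial[2:]`
def pvLoopB (parts : List String) (serial : List Char) : List String :=
  if 2 ≤ serial.length then
    pvLoopB (parts ++ [PySem.Int.toStr ((PySem.Int.ofCharsBase? (serial.take 2) 16).getD 0)])
      (serial.drop 2)
  else parts
termination_by serial.length
decreasing_by simp_all; omega

def convert_hex_serial_to_dec_alt (hex_serial : String) : String :=
  PySem.Str.join "." (pvLoopB [] (PySem.Str.replace hex_serial "ELTX" "454C5458").toList)

-- ===== PRECONDITION & SPEC =====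
-- successive 2-char chunks of the replaced string (odd trailing char dropped)
def pvChunks : List Char → List (List Char)
  | c1 :: c2 :: t => [c1, c2] :: pvChunks t
  | _ => []

-- Pre_ excludes exactly the inputs where some 2-char chunk is not a valid base-16
-- int literal, on which Python's int(x,16) raises ValueError in both A and B.
def Pre_convert_hex_serial_to_dec (hex_serial : String) : Prop :=
  ∀ p ∈ pvChunks (PySem.Str.replace hex_serial "ELTX" "454C5458").toList,
    (PySem.Int.ofCharsBase? p 16).isSome = true
instance (hex_serial : String) : Decidable (Pre_convert_hex_serial_to_dec hex_serial) := by
  unfold Pre_convert_hex_serial_to_dec; infer_instance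

def pvWitness_convert_hex_serial_to_dec : String := "ELTX"

def Spec_convert_hex_serial_to_dec (hex_serial : String) (out : String) : Prop := out = convert_hex_serial_to_dec_alt hex_serial
instance (hex_serial : String) (out : String) : Decidable (Spec_convert_hex_serial_to_dec hex_serial out) := by unfold Spec_convert_hex_serial_to_dec; infer_instance

-- ===== CLAIM (what is proved, stated in full; the proofs are below) =====
def Claim_equal_convert_hex_serial_to_dec : Prop := ∀ (hex_serial : String), Dom_convert_hex_serial_to_dec hex_serial → Pre_convert_hex_serial_to_dec hex_serial → Spec_convert_hex_serial_to_dec hex_serial (convert_hex_serial_to_dec hex_serial)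

-- ===== LEMMAS AND PROOFS =====

-- A's fold over enumerate, started at an even index with empty st, collects the 2-char chunks
theorem pvFoldA_eq (cs : List Char) : ∀ (s : Int) (r : List (List Char)),
    PySem.Int.mod s 2 = 0 →
    ((PySem.List.enumerate cs s).foldl pvStepA ([], r)).2 = r ++ pvChunks cs := by
  induction cs using pvChunks.induct with
  | case1 c1 c2 t ih =>
    intro s r hs
    have hmod : PySem.Int.mod s 2 = s % 2 := PySem.Int.mod_eq_emod_of_pos (by omega)
    have hmod1 : PySem.Int.mod (s + 1) 2 = (s + 1) % 2 :=
      PySem.Int.mod_eq_emod_of_pos (by omega)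
    have hs' : s % 2 = 0 := by rw [hmod] at hs; exact hs
    have hs2 : PySem.Int.mod (s + 2) 2 = 0 := by
      rw [PySem.Int.mod_eq_emod_of_pos (by omega)]; omega
    simp only [PySem.List.enumerate_cons, List.foldl_cons]
    rw [show pvStepA ([], r) (s, c1) = ([c1], r) by simp [pvStepA, hmod, hs']]
    rw [show pvStepA ([c1], r) (s + 1, c2) = ([], r ++ [[c1, c2]]) by
      simp [pvStepA]; omega]
    rw [ih (s + 1 + 1) (r ++ [[c1, c2]]) (by rw [show s + 1 + 1 = s + 2 by ring]; exact hs2)]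
    simp [pvChunks]
  | case2 cs hshape =>
    intro s r hs
    cases cs with
    | nil => simp [PySem.List.enumerate_nil, pvChunks]
    | cons c rest =>
      cases rest with
      | cons c2 t => exact (hshape c c2 t rfl).elim
      | nil =>
        have hmod : PySem.Int.mod s 2 = s % 2 := PySem.Int.mod_eq_emod_of_pos (by omega)
        have hs' : s % 2 = 0 := by rw [hmod] at hs; exact hs
        simp [PySem.List.enumerate_cons, PySem.List.enumerate_nil, pvStepA, hs', pvChunks]

-- B's while loop appends the converted chunks to parts
theorem pvLoopB_eq (cs : List Char) : ∀ (parts : List String),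
    pvLoopB parts cs =
      parts ++ (pvChunks cs).map (fun x => PySem.Int.toStr ((PySem.Int.ofCharsBase? x 16).getD 0)) := by
  induction cs using pvChunks.induct with
  | case1 c1 c2 t ih =>
    intro parts
    rw [pvLoopB]
    rw [if_pos (by simp)]
    rw [show (c1 :: c2 :: t).take 2 = [c1, c2] from rfl, show (c1 :: c2 :: t).drop 2 = t from rfl]
    rw [ih]
    simp [pvChunks]
  | case2 cs hshape =>
    intro parts
    rw [pvLoopB]
    cases cs with
    | nil => simp [pvChunks]
    | cons c rest =>
      cases rest with
      | cons c2 t => exact (hshape c c2 t rfl).elim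
      | nil => simp [pvChunks]

-- ===== VERDICT (by name: the statement is the Claim_ definition above) =====
theorem convert_hex_serial_to_dec_spec : Claim_equal_convert_hex_serial_to_dec := by
  intro hex_serial _ _
  unfold Spec_convert_hex_serial_to_dec convert_hex_serial_to_dec convert_hex_serial_to_dec_alt
  rw [pvFoldA_eq _ 0 [] (by decide), pvLoopB_eq]
  simp
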